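-- pv_equiv track=rewrite | github.com/yanwu-728/Sample-Projects | Document Distance/document_distance.py | get_similarity_score
-- ===== SOURCE A (Python) =====
-- def get_similarity_score(dict1, dict2, dissimilarity = False):
--     """
--     The keys of dict1 and dict2 are all lowercase,
--     you will NOT need to worry about case sensitivity.
--
--     Args:
--         dict1: frequency dictionary of words or n-grams for one text
--         dict2: frequency dictionary of words or n-grams for another text
--         dissimilarity: Boolean, optional parameter. Default to False.
--           If this is True, return the dissimilarity score, 100*(DIFF/ALL), instead.
--     Returns:
--         int, a percentage between 0 and 100, inclusive
--         representing how similar the texts are to each other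
--
--         The difference in text frequencies = DIFF sums words
--         from these three scenarios:
--         * If a word or n-gram occurs in dict1 and dict2 then
--           get the difference in frequencies
--         * If a word or n-gram occurs only in dict1 then take the
--           frequency from dict1
--         * If a word or n-gram occurs only in dict2 then take the
--           frequency from dict2
--          The total frequencies = ALL is calculated by summing
--          all frequencies in both dict1 and dict2.
--         Return 100*(1-(DIFF/ALL)) rounded to the nearest whole number if dissimilarity
--           is False, otherwise returns 100*(DIFF/ALL)
--     """
--     DIFF = 0
--     ALL = sum(dict1.values())+sum(dict2.values())#summing all the frequencies in dict1 and dict2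
--     assert ALL != 0
--     for i in dict2.keys():
--         if i in dict1.keys():
--             DIFF += abs(dict1[i] - dict2[i])#if i in both dict1 and dict2
--         else:
--             DIFF += dict2[i]#if i only in dict1
--     for i in dict1.keys():
--         if i not in dict2:
--             DIFF += dict1[i]#if i only in dict2
--     if dissimilarity == False:
--         return round(100*(1-DIFF/ALL))
--     else:
--         return round(100*DIFF/ALL)
-- ===== SOURCE B (Python) =====
-- def get_similarity_score(dict1, dict2, dissimilarity=False):
--     total = sum(dict1.values()) + sum(dict2.values())
--     assert total != 0
--     overlap = sum(min(v, dict2[k]) for k, v in dict1.items() if k in dict2)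
--     diff = total - 2 * overlap
--     if dissimilarity:
--         return round(100 * diff / total)
--     return round(100 * (1 - diff / total))
-- ===== Notes on version B (the rewrite author's own statement) =====
-- stated objective: simpler
-- what changed: Replaces A's two loops with their three-way case analysis by a single pass over the key intersection computing overlap = sum of min frequencies, using the identity |a-b| = a+b-2*min(a,b) so DIFF = ALL - 2*overlap.
import Mathlib
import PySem

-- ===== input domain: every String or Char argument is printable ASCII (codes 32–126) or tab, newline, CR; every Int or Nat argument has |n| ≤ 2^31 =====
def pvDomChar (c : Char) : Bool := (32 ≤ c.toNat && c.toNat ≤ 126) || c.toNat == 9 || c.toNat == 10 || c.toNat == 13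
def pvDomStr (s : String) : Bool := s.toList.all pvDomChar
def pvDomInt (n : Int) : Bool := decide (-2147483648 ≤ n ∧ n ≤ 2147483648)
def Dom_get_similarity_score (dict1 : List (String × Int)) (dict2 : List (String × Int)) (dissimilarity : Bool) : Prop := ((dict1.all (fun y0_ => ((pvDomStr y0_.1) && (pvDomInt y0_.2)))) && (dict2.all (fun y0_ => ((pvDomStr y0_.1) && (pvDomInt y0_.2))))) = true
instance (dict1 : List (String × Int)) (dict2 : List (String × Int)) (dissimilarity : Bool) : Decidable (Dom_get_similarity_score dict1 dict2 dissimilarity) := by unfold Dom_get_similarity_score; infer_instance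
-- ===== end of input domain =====

-- B replaces A's two loops (three-way case analysis) by one pass over the key intersection
-- via |a-b| = a+b-2*min(a,b); objective: simpler.

-- ===== PORT A =====
-- A-side helpers: an exact integer emulation of the IEEE-754 double operations in A's final
-- lines round(100*(1-DIFF/ALL)) / round(100*DIFF/ALL) (division, 1-x, 100*x: round to nearest,
-- ties to even, 53-bit significand; the magnitudes reachable here are far from overflow and
-- subnormals, where this model is exact) followed by Python's banker's round().
-- A float is represented exactly as a pair (m, e) with value m * 2^e.

def pvBitlen (n : Nat) : Nat := if n = 0 then 0 else Nat.log2 n + 1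

-- quotient/remainder of a / (q * 2^e) (for negative e: (a * 2^(-e)) / q), with the denominator
def pvFlAux (a q : Nat) (e : Int) : Nat × Nat × Nat :=
  let n := if 0 ≤ e then a else a <<< (-e).toNat
  let den := if 0 ≤ e then q <<< e.toNat else q
  (n / den, n % den, den)

-- correctly rounded double of the rational p/q (q ≠ 0), as (m, e)
def pvFl (p q : Int) : Int × Int :=
  if q = 0 then (0, 0) else
  let p' := if q < 0 then -p else p
  if p' = 0 then (0, 0) else
  let s : Int := if p' < 0 then -1 else 1
  let a := p'.natAbs
  let qn := q.natAbs
  let e0 : Int := (pvBitlen a : Int) - (pvBitlen qn : Int) - 53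
  let x0 := pvFlAux a qn e0
  let y := if 2 ^ 53 ≤ x0.1 then
      (let x1 := pvFlAux a qn (e0 + 1); (x1.1, x1.2.1, x1.2.2, e0 + 1))
    else (x0.1, x0.2.1, x0.2.2, e0)
  let t := if y.2.2.1 < 2 * y.2.1 ∨ (2 * y.2.1 = y.2.2.1 ∧ y.1 % 2 = 1) then y.1 + 1 else y.1
  (s * (t : Int), y.2.2.2)

-- the double 1 - x (exact subtraction, then one rounding)
def pvFsub1 (f : Int × Int) : Int × Int :=
  if 0 ≤ f.2 then pvFl (1 - f.1 * 2 ^ f.2.toNat) 1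
  else pvFl ((2 ^ (-f.2).toNat : Int) - f.1) (2 ^ (-f.2).toNat)

-- the double 100 * x (exact product, then one rounding)
def pvFmul100 (f : Int × Int) : Int × Int :=
  if 0 ≤ f.2 then pvFl (100 * f.1 * 2 ^ f.2.toNat) 1
  else pvFl (100 * f.1) (2 ^ (-f.2).toNat)

-- round-half-even of m / q (q > 0)
def pvBankers (m : Int) (q : Nat) : Int :=
  let sgn : Int := if m < 0 then -1 else 1
  let mm := m.natAbs
  let k := mm / q
  let r := mm % q
  sgn * ((if q < 2 * r ∨ (2 * r = q ∧ k % 2 = 1) then k + 1 else k : Nat) : Int)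

-- Python's round() applied to the double (m, e)
def pvFround (f : Int × Int) : Int :=
  if 0 ≤ f.2 then f.1 * 2 ^ f.2.toNat else pvBankers f.1 (2 ^ (-f.2).toNat)

def get_similarity_score (dict1 : List (String × Int)) (dict2 : List (String × Int)) (dissimilarity : Bool) : Int :=
  let d1 := PySem.Dict.ofList dict1
  let d2 := PySem.Dict.ofList dict2
  let ALL : Int := d1.values.sum + d2.values.sum
  -- assert ALL != 0  → Pre_get_similarity_score
  let DIFF : Int := d2.keys.foldl (fun acc i =>
      if d1.contains i then acc + |d1.getD i 0 - d2.getD i 0| else acc + d2.getD i 0) 0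
  let DIFF2 : Int := d1.keys.foldl (fun acc i =>
      if !(d2.contains i) then acc + d1.getD i 0 else acc) DIFF
  if dissimilarity = false then pvFround (pvFmul100 (pvFsub1 (pvFl DIFF2 ALL)))
  else pvFround (pvFl (100 * DIFF2) ALL)

-- ===== PORT B =====
-- B-side helpers: B's final lines are the same Python float expressions, but B's port carries
-- its own (differently structured) exact model of them: a double is kept as an exact dyadic
-- fraction num/den (den a power of two), with one shared round-half-even primitive.

-- B floats are their own type: an exact dyadic fraction fnum/fden (fden a power of two)
structure BFrac where
  fnum : ℤ
  fden : ℕ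
deriving Repr, DecidableEq

-- the fraction (a/b)·2^(-e), as a numerator/denominator pair
def bShift (a b : ℕ) (e : ℤ) : ℕ × ℕ :=
  if e < 0 then (a * 2 ^ (-e).toNat, b) else (a, b * 2 ^ e.toNat)

-- n/d rounded to the nearest integer, ties to even (quotient plus a carry)
def bHalfEven (n d : ℕ) : ℕ :=
  let q := n / d
  q + (if d < 2 * (n % d) || (2 * (n % d) == d && q % 2 == 1) then 1 else 0)

-- the mantissa of a/b rounded at exponent e
def bMant (a b : ℕ) (e : ℤ) : ℕ :=
  let nd := bShift a b e
  bHalfEven nd.1 nd.2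

-- does the 53-bit window at exponent e overflow (so the exponent must grow)?
def bNeedGrow (a b : ℕ) (e : ℤ) : Bool :=
  let nd := bShift a b e
  2 ^ 53 ≤ nd.1 / nd.2

-- the correctly rounded double of p/q, as a dyadic fraction
def bFl (p q : ℤ) : BFrac :=
  let num := if q < 0 then -p else p
  if q == 0 || num == 0 then { fnum := 0, fden := 1 } else
  let e0 := (PySem.Int.bitLength num : ℤ) - (PySem.Int.bitLength q : ℤ) - 53
  let e1 := if bNeedGrow num.natAbs q.natAbs e0 then e0 + 1 else e0
  let mant := bMant num.natAbs q.natAbs e1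
  let sm := if num < 0 then -(mant : ℤ) else (mant : ℤ)
  if e1 < 0 then { fnum := sm, fden := 2 ^ (-e1).toNat }
  else { fnum := sm * 2 ^ e1.toNat, fden := 1 }

-- the doubles 1 - x and 100 * x on dyadic fractions (exact, then one rounding)
def bSub1 (x : BFrac) : BFrac := bFl ((x.fden : ℤ) - x.fnum) (x.fden : ℤ)
def bMul100 (x : BFrac) : BFrac := bFl (100 * x.fnum) (x.fden : ℤ)

-- Python's round() on a dyadic fraction
def bRound (x : BFrac) : ℤ :=
  if x.fnum < 0 then -((bHalfEven x.fnum.natAbs x.fden : ℕ) : ℤ)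
  else ((bHalfEven x.fnum.natAbs x.fden : ℕ) : ℤ)

def get_similarity_score_alt (dict1 : List (String × Int)) (dict2 : List (String × Int)) (dissimilarity : Bool) : Int :=
  let d1 := PySem.Dict.ofList dict1
  let d2 := PySem.Dict.ofList dict2
  let total := d1.values.sum + d2.values.sum
  -- assert total != 0  → Pre_get_similarity_score
  -- sum(min(v, dict2[k]) for k, v in dict1.items() if k in dict2)
  let overlap := d1.items.foldr (fun kv acc =>
      if d2.contains kv.1 then min kv.2 (d2.getD kv.1 0) + acc else acc) 0
  let diff := total - 2 * overlap
  if dissimilarity then bRound (bFl (100 * diff) total)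
  else bRound (bMul100 (bSub1 (bFl diff total)))

-- ===== PRECONDITION & SPEC =====
-- exactly where Python A returns: the assert requires the grand total of frequencies to be nonzero
def Pre_get_similarity_score (dict1 : List (String × Int)) (dict2 : List (String × Int)) (dissimilarity : Bool) : Prop :=
  (PySem.Dict.ofList dict1).values.sum + (PySem.Dict.ofList dict2).values.sum ≠ 0
instance (dict1 : List (String × Int)) (dict2 : List (String × Int)) (dissimilarity : Bool) : Decidable (Pre_get_similarity_score dict1 dict2 dissimilarity) := by unfold Pre_get_similarity_score; infer_instance

def pvWitness_get_similarity_score : (List (String × Int)) × (List (String × Int)) × Bool :=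
  ([("a", 2)], [("a", 1)], false)

def Spec_get_similarity_score (dict1 : List (String × Int)) (dict2 : List (String × Int)) (dissimilarity : Bool) (out : Int) : Prop := out = get_similarity_score_alt dict1 dict2 dissimilarity
instance (dict1 : List (String × Int)) (dict2 : List (String × Int)) (dissimilarity : Bool) (out : Int) : Decidable (Spec_get_similarity_score dict1 dict2 dissimilarity out) := by unfold Spec_get_similarity_score; infer_instance

-- ===== CLAIM (what is proved, stated in full; the proofs are below) =====
def Claim_equal_get_similarity_score : Prop := ∀ (dict1 : List (String × Int)) (dict2 : List (String × Int)) (dissimilarity : Bool), Dom_get_similarity_score dict1 dict2 dissimilarity → Pre_get_similarity_score dict1 dict2 dissimilarity → Spec_get_similarity_score dict1 dict2 dissimilarity (get_similarity_score dict1 dict2 dissimilarity)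

-- ===== LEMMAS AND PROOFS =====

-- bridge between B's dyadic-fraction floats and A's (mantissa, exponent) floats
def pairToFrac (f : Int × Int) : BFrac :=
  if 0 ≤ f.2 then { fnum := f.1 * 2 ^ f.2.toNat, fden := 1 }
  else { fnum := f.1, fden := 2 ^ (-f.2).toNat }

-- the Prop form of bHalfEven's Bool carry condition
theorem pv_halfEven_eq (n d : Nat) :
    bHalfEven n d = if d < 2 * (n % d) ∨ (2 * (n % d) = d ∧ n / d % 2 = 1)
      then n / d + 1 else n / d := by
  unfold bHalfEven
  by_cases h1 : d < 2 * (n % d) <;> by_cases h2 : 2 * (n % d) = d <;>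
    by_cases h3 : n / d % 2 = 1 <;> simp [h1, h2, h3]

theorem pv_bitlen_eq (n : Nat) : PySem.Int.bitLength (n : Int) = pvBitlen n := by
  induction n using Nat.strong_induction_on with
  | _ n ih =>
    rcases Nat.eq_zero_or_pos n with h0 | hpos
    · simp [h0, pvBitlen]
    · rw [PySem.Int.bitLength_natCast hpos, ih (n / 2) (by omega)]
      rcases Nat.lt_or_ge n 2 with h2 | h2
      · have hn1 : n = 1 := by omega
        subst hn1
        decide
      · have hlog : Nat.log2 n = Nat.log2 (n / 2) + 1 := by
          rw [Nat.log2_eq_log_two, Nat.log2_eq_log_two, Nat.log_div_base]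
          have := Nat.log_pos (by norm_num : (1 : Nat) < 2) h2
          omega
        simp only [pvBitlen, if_neg (by omega : ¬ n = 0), if_neg (by omega : ¬ n / 2 = 0), hlog]

theorem pv_bitlen_natAbs (m : Int) : PySem.Int.bitLength m = pvBitlen m.natAbs := by
  rcases Int.natAbs_eq m with h | h
  · rw [h]; exact pv_bitlen_eq m.natAbs
  · conv_lhs => rw [h]
    rw [PySem.Int.bitLength_neg]; exact pv_bitlen_eq m.natAbs

theorem pv_flAux_eq (a q : Nat) (e : Int) :
    pvFlAux a q e = ((bShift a q e).1 / (bShift a q e).2, (bShift a q e).1 % (bShift a q e).2,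
      (bShift a q e).2) := by
  unfold pvFlAux bShift
  rcases lt_or_ge e 0 with h | h
  · simp [h, not_le.mpr h, Nat.shiftLeft_eq]
  · simp [not_lt.mpr h, h, Nat.shiftLeft_eq]

theorem pv_fl_bridge (p q : Int) : bFl p q = pairToFrac (pvFl p q) := by
  unfold bFl pvFl
  by_cases hq : q = 0
  · simp [hq, pairToFrac]
  · simp only [hq, if_false]
    set num : Int := if q < 0 then -p else p with hnum
    by_cases h0 : num = 0
    · simp [hq, h0, pairToFrac]
    · simp only [h0, or_false, if_false]
      rw [if_neg (by simp [hq, h0])]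
      rw [pv_bitlen_natAbs num, pv_bitlen_natAbs q]
      set e0 : Int := (pvBitlen num.natAbs : Int) - (pvBitlen q.natAbs : Int) - 53 with he0
      rw [pv_flAux_eq, pv_flAux_eq]
      set f0 := bShift num.natAbs q.natAbs e0 with hf0
      set f1 := bShift num.natAbs q.natAbs (e0 + 1) with hf1
      simp only [bNeedGrow, bMant, decide_eq_true_eq]
      rw [← hf0]
      by_cases hbig : 2 ^ 53 ≤ f0.1 / f0.2
      · simp only [hbig, if_true]
        rw [← hf1]
        set t1 := bHalfEven f1.1 f1.2 with ht1
        have htv : (if f1.2 < 2 * (f1.1 % f1.2) ∨ (2 * (f1.1 % f1.2) = f1.2 ∧ f1.1 / f1.2 % 2 = 1)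
            then f1.1 / f1.2 + 1 else f1.1 / f1.2) = t1 := by
          rw [ht1, pv_halfEven_eq]
        rw [htv]
        unfold pairToFrac
        rcases lt_or_ge (e0 + 1) 0 with he | he
        · rw [if_pos he, if_neg (not_le.mpr he)]
          have hs : (if num < 0 then -(t1 : Int) else (t1 : Int)) =
              (if num < 0 then (-1 : Int) else 1) * (t1 : Int) := by
            split_ifs <;> ring
          rw [hs]
        · rw [if_neg (not_lt.mpr he), if_pos he]
          have hs : (if num < 0 then -(t1 : Int) else (t1 : Int)) =
              (if num < 0 then (-1 : Int) else 1) * (t1 : Int) := by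
            split_ifs <;> ring
          rw [hs]
      · simp only [hbig, if_false]
        rw [← hf0]
        set t0 := bHalfEven f0.1 f0.2 with ht0
        have htv : (if f0.2 < 2 * (f0.1 % f0.2) ∨ (2 * (f0.1 % f0.2) = f0.2 ∧ f0.1 / f0.2 % 2 = 1)
            then f0.1 / f0.2 + 1 else f0.1 / f0.2) = t0 := by
          rw [ht0, pv_halfEven_eq]
        rw [htv]
        unfold pairToFrac
        rcases lt_or_ge e0 0 with he | he
        · rw [if_pos he, if_neg (not_le.mpr he)]
          have hs : (if num < 0 then -(t0 : Int) else (t0 : Int)) =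
              (if num < 0 then (-1 : Int) else 1) * (t0 : Int) := by
            split_ifs <;> ring
          rw [hs]
        · rw [if_neg (not_lt.mpr he), if_pos he]
          have hs : (if num < 0 then -(t0 : Int) else (t0 : Int)) =
              (if num < 0 then (-1 : Int) else 1) * (t0 : Int) := by
            split_ifs <;> ring
          rw [hs]

theorem pv_frac_of_neg (f : Int × Int) (he : f.2 < 0) :
    pairToFrac f = { fnum := f.1, fden := 2 ^ (-f.2).toNat } := by
  unfold pairToFrac; simp [not_le.mpr he]

theorem pv_frac_of_nonneg (f : Int × Int) (he : 0 ≤ f.2) :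
    pairToFrac f = { fnum := f.1 * 2 ^ f.2.toNat, fden := 1 } := by
  unfold pairToFrac; simp [he]

theorem pv_sub1_bridge (f : Int × Int) : bSub1 (pairToFrac f) = pairToFrac (pvFsub1 f) := by
  unfold bSub1 pvFsub1
  rcases lt_or_ge f.2 0 with he | he
  · rw [pv_frac_of_neg f he]
    simp only [not_le.mpr he, if_false]
    rw [pv_fl_bridge]
    push_cast
    rfl
  · rw [pv_frac_of_nonneg f he]
    simp only [he, if_true]
    rw [pv_fl_bridge]
    norm_num

theorem pv_mul100_bridge (f : Int × Int) : bMul100 (pairToFrac f) = pairToFrac (pvFmul100 f) := by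
  unfold bMul100 pvFmul100
  rcases lt_or_ge f.2 0 with he | he
  · rw [pv_frac_of_neg f he]
    simp only [not_le.mpr he, if_false]
    rw [pv_fl_bridge]
    push_cast
    rfl
  · rw [pv_frac_of_nonneg f he]
    simp only [he, if_true]
    rw [pv_fl_bridge, ← mul_assoc]
    norm_num

theorem pv_halfEven_one (n : Nat) : bHalfEven n 1 = n := by
  rw [pv_halfEven_eq]
  simp [Nat.mod_one]

theorem pv_round_bridge (f : Int × Int) : bRound (pairToFrac f) = pvFround f := by
  unfold pvFround
  rcases lt_or_ge f.2 0 with he | he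
  · rw [pv_frac_of_neg f he]
    simp only [not_le.mpr he, if_false]
    unfold bRound pvBankers
    rw [pv_halfEven_eq]
    rcases lt_or_ge f.1 0 with h | h
    · simp only [h, if_true]
      push_cast
      ring
    · simp only [not_lt.mpr h, if_false]
      push_cast
      ring
  · rw [pv_frac_of_nonneg f he]
    simp only [he, if_true]
    unfold bRound
    rw [pv_halfEven_one]
    dsimp only
    split_ifs with h <;> omega

theorem pv_foldl_if (l : List String) (init : Int) (c : String → Bool) (x y : String → Int) :
    l.foldl (fun acc i => if c i then acc + x i else acc + y i) init
      = init + (l.map (fun i => if c i then x i else y i)).sum := by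
  induction l generalizing init with
  | nil => simp
  | cons h t ih => by_cases hc : c h <;> simp [hc, ih] <;> ring

theorem pv_foldl_guard (l : List String) (init : Int) (c : String → Bool) (x : String → Int) :
    l.foldl (fun acc i => if c i then acc + x i else acc) init
      = init + (l.map (fun i => if c i then x i else 0)).sum := by
  induction l generalizing init with
  | nil => simp
  | cons h t ih => by_cases hc : c h <;> simp [hc, ih] <;> ring

theorem pv_sum_filter {α : Type} (l : List α) (c : α → Bool) (x : α → Int) :
    ((l.filter c).map x).sum = (l.map (fun p => if c p then x p else 0)).sum := by
  induction l with
  | nil => simp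
  | cons h t ih => by_cases hc : c h <;> simp [hc, ih]

theorem pv_sum_map_add {α : Type} (l : List α) (f g : α → Int) :
    (l.map (fun k => f k + g k)).sum = (l.map f).sum + (l.map g).sum := by
  induction l with
  | nil => simp
  | cons h t ih => simp [ih]; ring

theorem pv_sum_map_neg {α : Type} (l : List α) (f : α → Int) :
    (l.map (fun k => -(f k))).sum = -((l.map f).sum) := by
  induction l with
  | nil => simp
  | cons h t ih => simp only [List.map_cons, List.sum_cons, ih]; ring

theorem pv_sum_map_mul {α : Type} (l : List α) (c : Int) (f : α → Int) :
    (l.map (fun k => c * f k)).sum = c * (l.map f).sum := by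
  induction l with
  | nil => simp
  | cons h t ih => simp only [List.map_cons, List.sum_cons, ih]; ring

theorem pv_foldr_sum_if {α : Type} (l : List α) (c : α → Bool) (g : α → Int) :
    l.foldr (fun kv acc => if c kv then g kv + acc else acc) 0
      = ((l.filter c).map g).sum := by
  induction l with
  | nil => simp
  | cons h t ih => by_cases hc : c h <;> simp [hc, ih]

-- the sum of g over the intersection can be taken over either key list
theorem pv_sum_inter (K1 K2 : List String) (h1 : K1.Nodup) (h2 : K2.Nodup) (g : String → Int) :
    (K2.map (fun k => if k ∈ K1 then g k else 0)).sum
      = (K1.map (fun k => if k ∈ K2 then g k else 0)).sum := by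
  have key : ∀ (K L : List String), K.Nodup →
      (K.map (fun k => if k ∈ L then g k else 0)).sum
        = ∑ k ∈ K.toFinset ∩ L.toFinset, g k := by
    intro K L hK
    rw [← List.sum_toFinset _ hK]
    rw [Finset.sum_congr rfl (fun k _ => by
      show (if k ∈ L then g k else 0) = if k ∈ L.toFinset then g k else 0
      simp [List.mem_toFinset])]
    exact Finset.sum_ite_mem K.toFinset L.toFinset g
  rw [key K2 K1 h2, key K1 K2 h1, Finset.inter_comm]

theorem get_similarity_score_core (dict1 dict2 : List (String × Int)) :
    (let d1 := PySem.Dict.ofList dict1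
     let d2 := PySem.Dict.ofList dict2
     (d1.keys.foldl (fun acc i => if !(d2.contains i) then acc + d1.getD i 0 else acc)
        (d2.keys.foldl (fun acc i =>
          if d1.contains i then acc + |d1.getD i 0 - d2.getD i 0| else acc + d2.getD i 0) 0))
      = (d1.values.sum + d2.values.sum)
        - 2 * ((d1.items.filter (fun p => d2.contains p.1)).map
            (fun p => min p.2 (d2.getD p.1 0))).sum) := by
  intro d1 d2
  have hn1 : d1.keys.Nodup := PySem.Dict.nodup_keys_ofList dict1
  have hn2 : d2.keys.Nodup := PySem.Dict.nodup_keys_ofList dict2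
  set a : String → Int := fun k => d1.getD k 0 with ha
  set b : String → Int := fun k => d2.getD k 0 with hb
  -- values as sums over keys
  have hv1 : d1.values.sum = (d1.keys.map a).sum := by
    rw [PySem.Dict.values_eq_map_keys d1 hn1 0]
  have hv2 : d2.values.sum = (d2.keys.map b).sum := by
    rw [PySem.Dict.values_eq_map_keys d2 hn2 0]
  -- contains as key membership
  have hc1 : ∀ k, d1.contains k = decide (k ∈ d1.keys) :=
    fun k => PySem.Dict.contains_eq_decide_mem_keys d1 k
  have hc2 : ∀ k, d2.contains k = decide (k ∈ d2.keys) :=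
    fun k => PySem.Dict.contains_eq_decide_mem_keys d2 k
  -- overlap over items = guarded sum over keys
  have hov : ((d1.items.filter (fun p => d2.contains p.1)).map
        (fun p => min p.2 (d2.getD p.1 0))).sum
      = (d1.keys.map (fun k => if k ∈ d2.keys then min (a k) (b k) else 0)).sum := by
    rw [pv_sum_filter, PySem.Dict.items_eq_map_keys d1 hn1 0, List.map_map]
    refine congrArg _ (List.map_congr_left ?_)
    intro k _
    simp only [Function.comp, hc2 k]
    by_cases h : k ∈ d2.keys <;> simp [h, ha, hb]
  rw [pv_foldl_guard, pv_foldl_if, hv1, hv2, hov]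
  -- rewrite the two loop summands pointwise
  have hstep2 : (d2.keys.map (fun i => if d1.contains i then |a i - b i| else b i)).sum
      = (d2.keys.map b).sum
        + (d2.keys.map (fun k => if k ∈ d1.keys then a k - 2 * min (a k) (b k) else 0)).sum := by
    rw [← pv_sum_map_add]
    refine congrArg _ (List.map_congr_left ?_)
    intro k _
    rw [hc1 k]
    by_cases h : k ∈ d1.keys
    · simp only [h, decide_true, if_true]
      rcases le_total (a k) (b k) with hle | hle
      · rw [abs_of_nonpos (by omega), min_eq_left hle]; ring
      · rw [abs_of_nonneg (by omega), min_eq_right hle]; ring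
    · simp [h]
  have hstep1 : (d1.keys.map (fun i => if !(d2.contains i) then a i else 0)).sum
      = (d1.keys.map a).sum
        - (d1.keys.map (fun k => if k ∈ d2.keys then a k else 0)).sum := by
    have : (d1.keys.map (fun i => if !(d2.contains i) then a i else 0)).sum
        = (d1.keys.map (fun k => a k + -(if k ∈ d2.keys then a k else 0))).sum := by
      refine congrArg _ (List.map_congr_left ?_)
      intro k _
      rw [hc2 k]
      by_cases h : k ∈ d2.keys <;> simp [h]
    rw [this, pv_sum_map_add, pv_sum_map_neg]
    ring
  rw [zero_add, hstep2, hstep1]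
  -- move the intersection sum from K2 to K1 and split it
  rw [pv_sum_inter d1.keys d2.keys hn1 hn2]
  have hsplit : (d1.keys.map (fun k => if k ∈ d2.keys then a k - 2 * min (a k) (b k) else 0)).sum
      = (d1.keys.map (fun k => if k ∈ d2.keys then a k else 0)).sum
        - 2 * (d1.keys.map (fun k => if k ∈ d2.keys then min (a k) (b k) else 0)).sum := by
    have : (d1.keys.map (fun k => if k ∈ d2.keys then a k - 2 * min (a k) (b k) else 0)).sum
        = (d1.keys.map (fun k => (if k ∈ d2.keys then a k else 0)
            + -(2 * (if k ∈ d2.keys then min (a k) (b k) else 0)))).sum := by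
      refine congrArg _ (List.map_congr_left ?_)
      intro k _
      by_cases h : k ∈ d2.keys <;> simp [h] <;> ring
    rw [this, pv_sum_map_add]
    rw [pv_sum_map_neg d1.keys (fun k => 2 * (if k ∈ d2.keys then min (a k) (b k) else 0)),
        pv_sum_map_mul]
    ring
  rw [hsplit]
  ring

-- ===== VERDICT (by name: the statement is the Claim_ definition above) =====
theorem get_similarity_score_spec : Claim_equal_get_similarity_score := by
  intro dict1 dict2 dissimilarity _ _
  show get_similarity_score dict1 dict2 dissimilarity = get_similarity_score_alt dict1 dict2 dissimilarity
  unfold get_similarity_score get_similarity_score_alt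
  have h := get_similarity_score_core dict1 dict2
  simp only at h ⊢
  rw [pv_foldr_sum_if, h]
  cases dissimilarity <;>
    simp [pv_fl_bridge, pv_sub1_bridge, pv_mul100_bridge, pv_round_bridge]
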